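-- pv_equiv track=rewrite | github.com/nhunguet/SearchEngine | Group2/demo rev duplicate.py | find_largest_flat_area
-- ===== SOURCE A (Python) =====
-- def find_largest_flat_area(bits):
--     """
--     Finds the largest flat area of the distribution in a sequence of bits.
--     A flat area is a region with mostly 0s that has maximum 1s outside it.
--
--     Args:
--         bits: A list of 0s and 1s, where 1 represents a tag and 0 represents a non-tag token.
--
--     Returns:
--         A tuple (i, j) where i is the start index and j is the end index of the flat area.
--     """
--     n = len(bits)
--     if n == 0:
--         return 0, 0
--
--     # Calculate prefix sums for O(1) range sum queries
--     prefix_sum = [0] * (n + 1)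
--     for i in range(n):
--         prefix_sum[i + 1] = prefix_sum[i] + bits[i]
--
--     max_score = float('-inf')
--     best_i = 0
--     best_j = 0
--
--     # For each possible range [i,j]
--     for i in range(n):
--         for j in range(i, n):
--             # Count tags outside the range and zeros inside the range
--             tags_outside = prefix_sum[i] + (prefix_sum[n] - prefix_sum[j + 1])
--             zeros_inside = (j - i + 1) - (prefix_sum[j + 1] - prefix_sum[i])
--
--             # Score is weighted sum of tags outside and zeros inside
--             score = tags_outside + zeros_inside
--
--             if score > max_score:
--                 max_score = score
--                 best_i = i
--                 best_j = j
--
--     return best_i, best_j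
-- ===== SOURCE B (Python) =====
-- def find_largest_flat_area(bits):
--     """O(n) single pass: score(i,j) = f(i) + g(j) + total with
--     f(i) = 2*pref(i) - i and g(j) = (j+1) - 2*pref(j+1); keep the running
--     first-argmax of f over i <= j and a suffix-style scan over j."""
--     n = len(bits)
--     if n == 0:
--         return 0, 0
--     total = sum(bits)
--     pref = 0
--     best_f, best_fi = 0, 0  # f(0) = 0
--     max_score, best_i, best_j = None, 0, 0
--     for j in range(n):
--         fj = 2 * pref - j
--         if fj > best_f:
--             best_f, best_fi = fj, j
--         pref += bits[j]
--         score = best_f + (j + 1) - 2 * pref + total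
--         if max_score is None or score > max_score:
--             max_score, best_i, best_j = score, best_fi, j
--     return best_i, best_j
-- ===== Notes on version B (the rewrite author's own statement) =====
-- stated objective: faster
-- what changed: Replaced the quadratic scan over all ranges [i,j] by decomposing the score into f(i)+g(j)+total and doing one linear pass that keeps the running first-argmax of f(i) while scanning j.
import Mathlib
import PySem

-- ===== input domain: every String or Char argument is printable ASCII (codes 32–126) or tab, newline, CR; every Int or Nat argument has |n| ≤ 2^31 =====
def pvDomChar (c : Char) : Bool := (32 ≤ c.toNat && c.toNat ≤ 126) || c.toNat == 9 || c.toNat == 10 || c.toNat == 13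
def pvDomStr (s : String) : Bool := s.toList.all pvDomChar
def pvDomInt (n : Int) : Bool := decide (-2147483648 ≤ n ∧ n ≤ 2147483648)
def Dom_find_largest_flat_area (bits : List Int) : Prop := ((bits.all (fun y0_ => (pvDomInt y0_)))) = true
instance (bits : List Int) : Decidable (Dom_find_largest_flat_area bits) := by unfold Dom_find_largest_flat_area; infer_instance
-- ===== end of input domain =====

-- B changes the algorithm: A scans all O(n^2) ranges; B decomposes the score as
-- f(i)+g(j)+total and finds the best pair in one O(n) pass (proved equal, same tie-breaking).

-- 'if score > max_score' with max_score initialised to -inf: none plays -inf (both Pythons use this update)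
def pvStep {α : Type} (st : Option Int × α) (v : Int) (a : α) : Option Int × α :=
  match st.1 with
  | none => (some v, a)
  | some m => if m < v then (some v, a) else st

-- ===== PORT A =====
-- the prefix_sum list: prefA bits s = [s, s+bits[0], s+bits[0]+bits[1], …]
def prefA : List Int → Int → List Int
  | [], s => [s]
  | b :: rest, s => s :: prefA rest (s + b)

-- tags_outside + zeros_inside for the range [p.1, p.2], read off the prefix-sum list
def scoreA (pre : List Int) (n : Nat) (p : Nat × Nat) : Int :=
  (pre.getD p.1 0 + (pre.getD n 0 - pre.getD (p.2 + 1) 0)) +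
    (((p.2 : Int) - (p.1 : Int) + 1) - (pre.getD (p.2 + 1) 0 - pre.getD p.1 0))

def find_largest_flat_area (bits : List Int) : List Int :=
  let n := bits.length
  if n = 0 then [0, 0]
  else
    let pre := prefA bits 0
    let fin := (List.range n).foldl
      (fun st i => (List.range' i (n - i)).foldl
        (fun st j => pvStep st (scoreA pre n (i, j)) (i, j)) st)
      (none, (0, 0))
    [(fin.2.1 : Int), (fin.2.2 : Int)]

-- ===== PORT B =====
-- one pass: state = (pref, best_f, best_fi, (max_score, best_i, best_j))
def stepB (bits : List Int) (total : Int)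
    (st : Int × Int × Nat × (Option Int × Nat × Nat)) (j : Nat) :
    Int × Int × Nat × (Option Int × Nat × Nat) :=
  let fj := 2 * st.1 - (j : Int)
  let bF := if st.2.1 < fj then fj else st.2.1
  let bFi := if st.2.1 < fj then j else st.2.2.1
  let pref' := st.1 + bits.getD j 0
  let score := bF + ((j : Int) + 1) - 2 * pref' + total
  (pref', bF, bFi, pvStep st.2.2.2 score (bFi, j))

def find_largest_flat_area_alt (bits : List Int) : List Int :=
  if bits.length = 0 then [0, 0]
  else
    let total := bits.foldl (· + ·) 0
    let fin := (List.range bits.length).foldl (stepB bits total) (0, 0, 0, (none, 0, 0))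
    [(fin.2.2.2.2.1 : Int), (fin.2.2.2.2.2 : Int)]

-- ===== PRECONDITION & SPEC =====
def Spec_find_largest_flat_area (bits : List Int) (out : List Int) : Prop := out = find_largest_flat_area_alt bits
instance (bits : List Int) (out : List Int) : Decidable (Spec_find_largest_flat_area bits out) := by unfold Spec_find_largest_flat_area; infer_instance

-- ===== CLAIM (what is proved, stated in full; the proofs are below) =====
def Claim_equal_find_largest_flat_area : Prop := ∀ (bits : List Int), Dom_find_largest_flat_area bits → Spec_find_largest_flat_area bits (find_largest_flat_area bits)

-- ===== LEMMAS AND PROOFS =====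

-- run of the strict-improvement update, and the "first element attaining the maximum"
def pvRun {α : Type} (sc : α → Int) (st : Option Int × α) (l : List α) : Option Int × α :=
  l.foldl (fun st a => pvStep st (sc a) a) st

def pvFirstBest {α : Type} (sc : α → Int) : List α → Option (Int × α)
  | [] => none
  | a :: l => match pvFirstBest sc l with
    | none => some (sc a, a)
    | some (m, b) => if m ≤ sc a then some (sc a, a) else some (m, b)

-- mathematical views of the score decomposition
def prefS (bits : List Int) (k : Nat) : Int := (bits.take k).foldl (· + ·) 0
def fF (bits : List Int) (i : Nat) : Int := 2 * prefS bits i - (i : Int)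
def gG (bits : List Int) (j : Nat) : Int := ((j : Int) + 1) - 2 * prefS bits (j + 1)
def Hphi (bits : List Int) (j : Nat) : Int × Nat :=
  (pvFirstBest (fF bits) (List.range (j + 1))).getD (0, 0)
def scAm (bits : List Int) (p : Nat × Nat) : Int :=
  fF bits p.1 + gG bits p.2 + prefS bits bits.length
def scBm (bits : List Int) (p : Nat × Nat) : Int :=
  (Hphi bits p.2).1 + gG bits p.2 + prefS bits bits.length
def lexLt (p q : Nat × Nat) : Prop := p.1 < q.1 ∨ (p.1 = q.1 ∧ p.2 < q.2)
def LA (n : Nat) : List (Nat × Nat) :=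
  (List.range n).flatMap (fun i => (List.range' i (n - i)).map (fun j => (i, j)))
def LB (bits : List Int) : List (Nat × Nat) :=
  (List.range bits.length).map (fun j => ((Hphi bits j).2, j))

theorem foldl_add_init (l : List Int) (s : Int) : l.foldl (· + ·) s = s + l.foldl (· + ·) 0 := by
  induction l generalizing s with
  | nil => simp
  | cons b t ih =>
    simp only [List.foldl_cons]
    rw [ih (s + b), ih (0 + b)]
    ring

theorem prefA_getD (bits : List Int) (s : Int) (k : Nat) (hk : k ≤ bits.length) :
    (prefA bits s).getD k 0 = s + prefS bits k := by
  induction bits generalizing s k with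
  | nil =>
    have : k = 0 := Nat.le_zero.mp hk
    subst this
    simp [prefA, prefS]
  | cons b t ih =>
    cases k with
    | zero => simp [prefA, prefS]
    | succ k =>
      simp only [prefA, List.getD_cons_succ, prefS, List.take_succ_cons, List.foldl_cons]
      rw [ih (s + b) k (by simpa using hk)]
      have := foldl_add_init (t.take k) (0 + b)
      simp only [prefS] at *
      omega

theorem prefS_succ (bits : List Int) (k : Nat) (hk : k < bits.length) :
    prefS bits (k + 1) = prefS bits k + bits.getD k 0 := by
  unfold prefS
  rw [List.take_add_one, List.getElem?_eq_getElem hk]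
  rw [List.getD_eq_getElem?_getD, List.getElem?_eq_getElem hk]
  simp only [Option.toList_some, List.foldl_append, List.foldl_cons, List.foldl_nil,
    Option.getD_some]

theorem prefS_length (bits : List Int) : prefS bits bits.length = bits.foldl (· + ·) 0 := by
  simp [prefS]

theorem foldl_flatMap {α β σ : Type} (l : List β) (g : β → List α) (f : σ → α → σ) (st : σ) :
    (l.flatMap g).foldl f st = l.foldl (fun st i => (g i).foldl f st) st := by
  induction l generalizing st with
  | nil => rfl
  | cons b t ih => simp only [List.flatMap_cons, List.foldl_append, List.foldl_cons, ih]

theorem pvFirstBest_eq_none {α : Type} (sc : α → Int) (l : List α)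
    (h : pvFirstBest sc l = none) : l = [] := by
  cases l with
  | nil => rfl
  | cons a t =>
    exfalso
    simp only [pvFirstBest] at h
    cases h' : pvFirstBest sc t with
    | none => rw [h'] at h; simp at h
    | some p => obtain ⟨m, b⟩ := p; rw [h'] at h; dsimp only at h; split_ifs at h <;> cases h

theorem pvRun_someH {α : Type} (sc : α → Int) (l : List α) (m : Int) (b : α) (m' : Int) (b' : α)
    (h : pvFirstBest sc l = some (m', b')) :
    pvRun sc (some m, b) l = if m < m' then (some m', b') else (some m, b) := by
  induction l generalizing m b m' b' with
  | nil => simp [pvFirstBest] at h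
  | cons a t ih =>
    have hstep : pvStep (some m, b) (sc a) a = if m < sc a then (some (sc a), a) else (some m, b) := rfl
    simp only [pvFirstBest] at h
    cases ht : pvFirstBest sc t with
    | none =>
      have : t = [] := pvFirstBest_eq_none sc t ht
      subst this
      rw [ht] at h
      dsimp only at h
      simp only [Option.some.injEq, Prod.mk.injEq] at h
      obtain ⟨h1, h2⟩ := h
      subst h1; subst h2
      exact hstep
    | some p =>
      obtain ⟨m0, b0⟩ := p
      rw [ht] at h
      dsimp only at h
      show pvRun sc (pvStep (some m, b) (sc a) a) t = _
      rw [hstep]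
      by_cases hc : m0 ≤ sc a
      · rw [if_pos hc] at h
        simp only [Option.some.injEq, Prod.mk.injEq] at h
        obtain ⟨h3, h4⟩ := h
        subst h3; subst h4
        by_cases h5 : m < sc a
        · rw [if_pos h5, ih _ _ _ _ ht, if_neg (by omega)]
        · rw [if_neg h5, ih _ _ _ _ ht, if_neg (by omega)]
      · rw [if_neg hc] at h
        simp only [Option.some.injEq, Prod.mk.injEq] at h
        obtain ⟨h3, h4⟩ := h
        subst h3; subst h4
        by_cases h5 : m < sc a
        · rw [if_pos h5, ih _ _ _ _ ht, if_pos (by omega), if_pos (by omega : m < m0)]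
        · rw [if_neg h5, ih _ _ _ _ ht]

theorem pvRun_noneH {α : Type} (sc : α → Int) (l : List α) (d : α) (m : Int) (b : α)
    (h : pvFirstBest sc l = some (m, b)) :
    pvRun sc (none, d) l = (some m, b) := by
  cases l with
  | nil => simp [pvFirstBest] at h
  | cons a t =>
    have hstep : pvStep (α := α) (none, d) (sc a) a = (some (sc a), a) := rfl
    show pvRun sc (pvStep (none, d) (sc a) a) t = _
    rw [hstep]
    simp only [pvFirstBest] at h
    cases ht : pvFirstBest sc t with
    | none =>
      have : t = [] := pvFirstBest_eq_none sc t ht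
      subst this
      rw [ht] at h
      dsimp only at h
      simp only [Option.some.injEq, Prod.mk.injEq] at h
      obtain ⟨h1, h2⟩ := h
      subst h1; subst h2
      rfl
    | some p =>
      obtain ⟨m0, b0⟩ := p
      rw [ht] at h
      dsimp only at h
      rw [pvRun_someH sc t (sc a) a m0 b0 ht]
      by_cases hc : m0 ≤ sc a
      · rw [if_pos hc] at h
        simp only [Option.some.injEq, Prod.mk.injEq] at h
        obtain ⟨h3, h4⟩ := h
        subst h3; subst h4
        rw [if_neg (by omega)]
      · rw [if_neg hc] at h
        simp only [Option.some.injEq, Prod.mk.injEq] at h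
        obtain ⟨h3, h4⟩ := h
        subst h3; subst h4
        rw [if_pos (by omega)]

theorem pvRun_snoc {α : Type} (sc : α → Int) (st : Option Int × α) (l : List α) (a : α) :
    pvRun sc st (l ++ [a]) = pvStep (pvRun sc st l) (sc a) a := by
  simp [pvRun, List.foldl_append]

theorem pvFirstBest_snoc_some {α : Type} (sc : α → Int) (l : List α) (a : α) (m : Int) (b : α)
    (h : pvFirstBest sc l = some (m, b)) :
    pvFirstBest sc (l ++ [a]) = if m < sc a then some (sc a, a) else some (m, b) := by
  induction l generalizing m b with
  | nil => simp [pvFirstBest] at h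
  | cons x t ih =>
    simp only [pvFirstBest] at h
    simp only [List.cons_append, pvFirstBest]
    cases ht : pvFirstBest sc t with
    | none =>
      have : t = [] := pvFirstBest_eq_none sc t ht
      subst this
      rw [ht] at h
      dsimp only at h
      simp only [Option.some.injEq, Prod.mk.injEq] at h
      obtain ⟨h1, h2⟩ := h
      subst h1; subst h2
      have hA : pvFirstBest sc ([] ++ [a]) = some (sc a, a) := rfl
      rw [hA]
      dsimp only
      split_ifs <;> (first | rfl | (exfalso; omega))
    | some p =>
      obtain ⟨m0, b0⟩ := p
      rw [ht] at h
      dsimp only at h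
      by_cases hd : m0 < sc a
      · have hI : pvFirstBest sc (t ++ [a]) = some (sc a, a) := by
          rw [ih m0 b0 ht, if_pos hd]
        rw [hI]
        dsimp only
        by_cases hc : m0 ≤ sc x
        · rw [if_pos hc] at h
          simp only [Option.some.injEq, Prod.mk.injEq] at h
          obtain ⟨h3, h4⟩ := h
          subst h3; subst h4
          split_ifs <;> (first | rfl | (exfalso; omega))
        · rw [if_neg hc] at h
          simp only [Option.some.injEq, Prod.mk.injEq] at h
          obtain ⟨h3, h4⟩ := h
          subst h3; subst h4
          split_ifs <;> (first | rfl | (exfalso; omega))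
      · have hI : pvFirstBest sc (t ++ [a]) = some (m0, b0) := by
          rw [ih m0 b0 ht, if_neg hd]
        rw [hI]
        dsimp only
        by_cases hc : m0 ≤ sc x
        · rw [if_pos hc] at h
          simp only [Option.some.injEq, Prod.mk.injEq] at h
          obtain ⟨h3, h4⟩ := h
          subst h3; subst h4
          split_ifs <;> (first | rfl | (exfalso; omega))
        · rw [if_neg hc] at h
          simp only [Option.some.injEq, Prod.mk.injEq] at h
          obtain ⟨h3, h4⟩ := h
          subst h3; subst h4
          split_ifs <;> (first | rfl | (exfalso; omega))

theorem pvFirstBest_congr {α : Type} (sc sc' : α → Int) (l : List α)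
    (h : ∀ x ∈ l, sc x = sc' x) : pvFirstBest sc l = pvFirstBest sc' l := by
  induction l with
  | nil => rfl
  | cons a t ih =>
    have ha : sc a = sc' a := h a (List.mem_cons_self ..)
    have ht : pvFirstBest sc t = pvFirstBest sc' t :=
      ih (fun x hx => h x (List.mem_cons_of_mem a hx))
    simp only [pvFirstBest, ht, ha]

theorem pvFirstBest_spec {α : Type} (r : α → α → Prop) (sc : α → Int) (l : List α)
    (m : Int) (b : α) (hl : l.Pairwise r) (h : pvFirstBest sc l = some (m, b)) :
    b ∈ l ∧ sc b = m ∧ (∀ x ∈ l, sc x ≤ m) ∧ (∀ x ∈ l, sc x = m → b = x ∨ r b x) := by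
  induction l generalizing m b with
  | nil => simp [pvFirstBest] at h
  | cons a t ih =>
    rw [List.pairwise_cons] at hl
    obtain ⟨hra, hlt⟩ := hl
    simp only [pvFirstBest] at h
    cases ht : pvFirstBest sc t with
    | none =>
      have : t = [] := pvFirstBest_eq_none sc t ht
      subst this
      rw [ht] at h
      dsimp only at h
      simp only [Option.some.injEq, Prod.mk.injEq] at h
      obtain ⟨h1, h2⟩ := h
      subst h1; subst h2
      refine ⟨List.mem_cons_self .., rfl, ?_, ?_⟩
      · intro x hx; simp at hx; subst hx; exact le_refl _
      · intro x hx _; simp at hx; subst hx; exact Or.inl rfl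
    | some p =>
      obtain ⟨m0, b0⟩ := p
      rw [ht] at h
      dsimp only at h
      obtain ⟨hmem, hval, hmax, hfirst⟩ := ih m0 b0 hlt ht
      by_cases hc : m0 ≤ sc a
      · rw [if_pos hc] at h
        simp only [Option.some.injEq, Prod.mk.injEq] at h
        obtain ⟨h1, h2⟩ := h
        subst h1; subst h2
        refine ⟨List.mem_cons_self .., rfl, ?_, ?_⟩
        · intro x hx
          rcases List.mem_cons.mp hx with rfl | hx'
          · exact le_refl _
          · exact le_trans (hmax x hx') hc
        · intro x hx _
          rcases List.mem_cons.mp hx with rfl | hx'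
          · exact Or.inl rfl
          · exact Or.inr (hra x hx')
      · rw [if_neg hc] at h
        simp only [Option.some.injEq, Prod.mk.injEq] at h
        obtain ⟨h1, h2⟩ := h
        subst h1; subst h2
        refine ⟨List.mem_cons_of_mem a hmem, hval, ?_, ?_⟩
        · intro x hx
          rcases List.mem_cons.mp hx with rfl | hx'
          · omega
          · exact hmax x hx'
        · intro x hx hsx
          rcases List.mem_cons.mp hx with rfl | hx'
          · omega
          · exact hfirst x hx' hsx

theorem pvFirstBest_eq {α : Type} (r : α → α → Prop) (sc : α → Int) (l : List α)
    (m : Int) (b : α)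
    (hasym : ∀ x y, r x y → r y x → False)
    (hl : l.Pairwise r) (hb : b ∈ l) (hm : sc b = m)
    (hmax : ∀ x ∈ l, sc x ≤ m) (hfirst : ∀ x ∈ l, sc x = m → b = x ∨ r b x) :
    pvFirstBest sc l = some (m, b) := by
  cases h : pvFirstBest sc l with
  | none =>
    have : l = [] := pvFirstBest_eq_none sc l h
    subst this
    simp at hb
  | some p =>
    obtain ⟨m', b'⟩ := p
    obtain ⟨hmem', hval', hmax', hfirst'⟩ := pvFirstBest_spec r sc l m' b' hl h
    have hmm : m' = m := le_antisymm (hval' ▸ hmax b' hmem') (hm ▸ hmax' b hb)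
    subst hmm
    have hbb : b = b' := by
      rcases hfirst b' hmem' hval' with h1 | h1
      · exact h1
      · rcases hfirst' b hb hm with h2 | h2
        · exact h2.symm
        · exact absurd h1 (fun h1 => hasym b b' h1 h2)
    subst hbb
    rfl

theorem mem_LA (n : Nat) (p : Nat × Nat) : p ∈ LA n ↔ p.1 ≤ p.2 ∧ p.2 < n := by
  unfold LA
  simp only [List.mem_flatMap, List.mem_map, List.mem_range, List.mem_range'_1]
  constructor
  · rintro ⟨i, hi, j, hj, rfl⟩
    exact ⟨hj.1, by omega⟩
  · rintro ⟨h1, h2⟩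
    exact ⟨p.1, by omega, p.2, ⟨h1, by omega⟩, rfl⟩

theorem pairwise_flatMap_aux (n : Nat) (l : List Nat) (hl : l.Pairwise (· < ·)) :
    (l.flatMap (fun i => (List.range' i (n - i)).map (fun j => (i, j)))).Pairwise lexLt := by
  induction l with
  | nil => exact List.Pairwise.nil
  | cons i t ih =>
    rw [List.pairwise_cons] at hl
    obtain ⟨hit, hlt⟩ := hl
    rw [List.flatMap_cons, List.pairwise_append]
    refine ⟨?_, ih hlt, ?_⟩
    · rw [List.pairwise_map]
      exact List.Pairwise.imp (fun hab => Or.inr ⟨rfl, hab⟩) List.pairwise_lt_range'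
    · intro x hx y hy
      simp only [List.mem_map] at hx
      obtain ⟨j, _, rfl⟩ := hx
      simp only [List.mem_flatMap, List.mem_map] at hy
      obtain ⟨i', hi', j', _, rfl⟩ := hy
      exact Or.inl (hit i' hi')

theorem LA_pairwise (n : Nat) : (LA n).Pairwise lexLt :=
  pairwise_flatMap_aux n (List.range n) List.pairwise_lt_range

theorem LB_pairwise (bits : List Int) : (LB bits).Pairwise (fun p q => p.2 < q.2) := by
  unfold LB
  rw [List.pairwise_map]
  exact List.Pairwise.imp (fun h => h) List.pairwise_lt_range

theorem Hphi_some (bits : List Int) (j : Nat) :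
    pvFirstBest (fF bits) (List.range (j + 1)) = some (Hphi bits j) := by
  cases h : pvFirstBest (fF bits) (List.range (j + 1)) with
  | none =>
    have := pvFirstBest_eq_none _ _ h
    simp [List.range_eq_nil] at this
  | some p => simp [Hphi, h]

theorem Hphi_zero (bits : List Int) : Hphi bits 0 = (0, 0) := by
  have h1 : List.range 1 = [0] := rfl
  have h2 : fF bits 0 = 0 := by simp [fF, prefS]
  simp [Hphi, h1, pvFirstBest, h2]

theorem Hphi_spec (bits : List Int) (j : Nat) :
    (Hphi bits j).2 ≤ j ∧ fF bits (Hphi bits j).2 = (Hphi bits j).1 ∧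
      (∀ i ≤ j, fF bits i ≤ (Hphi bits j).1) ∧
      (∀ i ≤ j, fF bits i = (Hphi bits j).1 → (Hphi bits j).2 ≤ i) := by
  obtain ⟨hmem, hval, hmax, hfirst⟩ :=
    pvFirstBest_spec (· < ·) (fF bits) (List.range (j + 1)) (Hphi bits j).1 (Hphi bits j).2
      List.pairwise_lt_range (by rw [Hphi_some])
  rw [List.mem_range] at hmem
  refine ⟨by omega, hval, ?_, ?_⟩
  · intro i hi
    exact hmax i (List.mem_range.mpr (by omega))
  · intro i hi hf
    rcases hfirst i (List.mem_range.mpr (by omega)) hf with h | h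
    · omega
    · omega

theorem scoreA_eq (bits : List Int) (i j : Nat) (hij : i ≤ j) (hj : j < bits.length) :
    scoreA (prefA bits 0) bits.length (i, j) = scAm bits (i, j) := by
  unfold scoreA scAm fF gG
  rw [prefA_getD bits 0 i (by omega), prefA_getD bits 0 (j + 1) (by omega),
    prefA_getD bits 0 bits.length (by omega)]
  push_cast
  ring

theorem fF_zero (bits : List Int) : fF bits 0 = 0 := by simp [fF, prefS]

theorem Hphi_step (bits : List Int) (k : Nat) :
    Hphi bits k = if (Hphi bits (k - 1)).1 < fF bits k then (fF bits k, k) else Hphi bits (k - 1) := by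
  cases k with
  | zero =>
    rw [Hphi_zero]
    simp [fF_zero]
  | succ m =>
    have hs : List.range (m + 1 + 1) = List.range (m + 1) ++ [m + 1] := List.range_succ
    have hsnoc := pvFirstBest_snoc_some (fF bits) (List.range (m + 1)) (m + 1)
      (Hphi bits m).1 (Hphi bits m).2 (Hphi_some bits m)
    calc Hphi bits (m + 1) = (pvFirstBest (fF bits) (List.range (m + 1 + 1))).getD (0, 0) := rfl
      _ = _ := by
        rw [hs, hsnoc]
        simp only [Nat.add_sub_cancel]
        split_ifs <;> rfl

-- the one-pass loop invariant: after k steps the state is (prefix sum, running argmax of f, best range so far)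
theorem stepB_invariant (bits : List Int) (k : Nat) (hk : k ≤ bits.length) :
    (List.range k).foldl (stepB bits (prefS bits bits.length)) (0, 0, 0, (none, 0, 0)) =
      (prefS bits k, (Hphi bits (k - 1)).1, (Hphi bits (k - 1)).2,
        pvRun (scBm bits) (none, (0, 0)) ((List.range k).map (fun j => ((Hphi bits j).2, j)))) := by
  induction k with
  | zero =>
    simp only [List.range_zero, List.foldl_nil, List.map_nil]
    rw [Hphi_zero]
    rfl
  | succ k ih =>
    have hk' : k ≤ bits.length := by omega
    rw [List.range_succ, List.foldl_append, List.foldl_cons, List.foldl_nil, ih hk',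
      List.map_append, List.map_cons, List.map_nil, pvRun_snoc]
    have hsucc : k + 1 - 1 = k := rfl
    rw [hsucc]
    unfold stepB
    dsimp only
    have hfj : 2 * prefS bits k - (k : Int) = fF bits k := rfl
    rw [hfj]
    have hpref : prefS bits k + bits.getD k 0 = prefS bits (k + 1) :=
      (prefS_succ bits k (by omega)).symm
    rw [hpref]
    have hsc : scBm bits ((Hphi bits k).2, k) =
        (Hphi bits k).1 + ((k : Int) + 1) - 2 * prefS bits (k + 1) + prefS bits bits.length := by
      unfold scBm gG
      ring
    rw [hsc, Hphi_step bits k]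
    split_ifs with hcond <;> rfl

theorem lexLt_asym (x y : Nat × Nat) (h1 : lexLt x y) (h2 : lexLt y x) : False := by
  unfold lexLt at h1 h2
  omega

theorem main_eq (bits : List Int) : find_largest_flat_area bits = find_largest_flat_area_alt bits := by
  by_cases hn : bits.length = 0
  · unfold find_largest_flat_area find_largest_flat_area_alt
    rw [if_pos hn, if_pos hn]
  · -- the first maximiser of the one-pass scan
    obtain ⟨M, iB, jB, hq⟩ : ∃ M iB jB, pvFirstBest (scBm bits) (LB bits) = some (M, (iB, jB)) := by
      cases h : pvFirstBest (scBm bits) (LB bits) with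
      | none =>
        exfalso
        apply hn
        have h2 := pvFirstBest_eq_none _ _ h
        unfold LB at h2
        rw [List.map_eq_nil_iff, List.range_eq_nil] at h2
        exact h2
      | some p => exact ⟨p.1, p.2.1, p.2.2, by simpa using h⟩
    obtain ⟨hmemB, hvalB, hmaxB, hfirstB⟩ :=
      pvFirstBest_spec (fun p q => p.2 < q.2) (scBm bits) (LB bits) M (iB, jB)
        (LB_pairwise bits) hq
    -- decode membership: jB < n and iB = (Hphi bits jB).2
    unfold LB at hmemB
    rw [List.mem_map] at hmemB
    obtain ⟨j0, hj0, hj0eq⟩ := hmemB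
    rw [List.mem_range] at hj0
    have hsnd : j0 = jB := by simpa using congrArg Prod.snd hj0eq
    have hfst : (Hphi bits j0).2 = iB := by simpa using congrArg Prod.fst hj0eq
    rw [hsnd] at hfst hj0
    have hjB : jB < bits.length := hj0
    have hiB : iB = (Hphi bits jB).2 := hfst.symm
    obtain ⟨hphi_le, hphi_val, hphi_max, hphi_first⟩ := Hphi_spec bits jB
    -- the same pair is the first maximiser of the quadratic scan
    have hA : pvFirstBest (scoreA (prefA bits 0) bits.length) (LA bits.length) = some (M, (iB, jB)) := by
      rw [pvFirstBest_congr (scoreA (prefA bits 0) bits.length) (scAm bits) (LA bits.length)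
        (fun p hp => by
          obtain ⟨h1, h2⟩ := (mem_LA bits.length p).mp hp
          obtain ⟨i, j⟩ := p
          exact scoreA_eq bits i j h1 h2)]
      apply pvFirstBest_eq lexLt (scAm bits) (LA bits.length) M (iB, jB) lexLt_asym
        (LA_pairwise bits.length)
      · exact (mem_LA bits.length (iB, jB)).mpr ⟨hiB ▸ hphi_le, hjB⟩
      · -- scAm (iB, jB) = M
        have hAB : scAm bits (iB, jB) = scBm bits (iB, jB) := by
          unfold scAm scBm
          dsimp only
          rw [hiB, hphi_val]
        rw [hAB]
        exact hvalB
      · -- every range scores at most M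
        intro p hp
        obtain ⟨i, j⟩ := p
        obtain ⟨h1, h2⟩ := (mem_LA bits.length (i, j)).mp hp
        dsimp only at h1 h2
        have hmem : ((Hphi bits j).2, j) ∈ LB bits := by
          unfold LB
          rw [List.mem_map]
          exact ⟨j, List.mem_range.mpr h2, rfl⟩
        have hle1 : fF bits i ≤ (Hphi bits j).1 := (Hphi_spec bits j).2.2.1 i h1
        have hle2 : scBm bits ((Hphi bits j).2, j) ≤ M := hmaxB _ hmem
        unfold scBm at hle2
        dsimp only at hle2
        unfold scAm
        dsimp only
        omega
      · -- and any range scoring M is not lexicographically before (iB, jB)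
        intro p hp hps
        obtain ⟨i, j⟩ := p
        obtain ⟨h1, h2⟩ := (mem_LA bits.length (i, j)).mp hp
        dsimp only at h1 h2
        have hmem : ((Hphi bits j).2, j) ∈ LB bits := by
          unfold LB
          rw [List.mem_map]
          exact ⟨j, List.mem_range.mpr h2, rfl⟩
        have hle1 : fF bits i ≤ (Hphi bits j).1 := (Hphi_spec bits j).2.2.1 i h1
        have hle2 : scBm bits ((Hphi bits j).2, j) ≤ M := hmaxB _ hmem
        unfold scAm at hps
        dsimp only at hps
        unfold scBm at hle2
        dsimp only at hle2
        have hjeq : (Hphi bits j).1 + gG bits j + prefS bits bits.length = M := by omega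
        have hfi : fF bits i = (Hphi bits j).1 := by omega
        rcases hfirstB ((Hphi bits j).2, j) hmem hjeq with heq | hlt
        · -- same j: the running argmax is the first maximiser of f, so iB ≤ i
          have hj : jB = j := congrArg Prod.snd heq
          subst hj
          have hle : iB ≤ i := by
            rw [hiB]
            exact hphi_first i h1 hfi
          rcases Nat.lt_or_ge iB i with h | h
          · exact Or.inr (Or.inl h)
          · have hii : iB = i := by omega
            subst hii
            exact Or.inl rfl
        · -- jB < j: still iB ≤ i, else f i would exceed the maximum of f
          dsimp only at hlt
          have hle : iB ≤ i := by
            by_contra hcon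
            rw [Nat.not_le] at hcon
            rw [hiB] at hcon
            have hij : i ≤ jB := by omega
            have h3 : fF bits i ≤ (Hphi bits jB).1 := hphi_max i hij
            have h4 : fF bits i ≠ (Hphi bits jB).1 := fun hf => by
              have := hphi_first i hij hf
              omega
            have h5 : (Hphi bits jB).1 ≤ (Hphi bits j).1 := by
              have h6 := (Hphi_spec bits j).2.2.1 (Hphi bits jB).2 (by omega)
              rw [hphi_val] at h6
              exact h6
            omega
          rcases Nat.lt_or_ge iB i with h | h
          · exact Or.inr (Or.inl h)
          · have hii : iB = i := by omega
            subst hii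
            exact Or.inr (Or.inr ⟨rfl, hlt⟩)
    -- now evaluate both programs
    unfold find_largest_flat_area find_largest_flat_area_alt
    rw [if_neg hn, if_neg hn]
    dsimp only
    have hAfold : (List.range bits.length).foldl
        (fun st i => (List.range' i (bits.length - i)).foldl
          (fun st j => pvStep st (scoreA (prefA bits 0) bits.length (i, j)) (i, j)) st)
        ((none : Option Int), ((0 : Nat), (0 : Nat))) =
        pvRun (scoreA (prefA bits 0) bits.length) (none, (0, 0)) (LA bits.length) := by
      unfold pvRun LA
      rw [foldl_flatMap]
      simp only [List.foldl_map]
    rw [hAfold, pvRun_noneH _ _ _ M (iB, jB) hA]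
    rw [← prefS_length bits, stepB_invariant bits bits.length le_rfl]
    have hBrun : pvRun (scBm bits) (none, (0, 0))
        ((List.range bits.length).map (fun j => ((Hphi bits j).2, j))) = (some M, (iB, jB)) :=
      pvRun_noneH _ _ _ M (iB, jB) hq
    rw [hBrun]

-- ===== VERDICT (by name: the statement is the Claim_ definition above) =====
theorem find_largest_flat_area_spec : Claim_equal_find_largest_flat_area := by
  intro bits _
  unfold Spec_find_largest_flat_area
  exact main_eq bits
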